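-- pv_equiv track=rewrite | github.com/FoxoTech/methylize | methylize/combined_pvalues.py | merge_acfs
-- ===== SOURCE A (Python) =====
-- izip = zip
--
-- def merge_acfs(unmerged):
--     """
--     utitlity function to merge the chromosomes after
--     they've been calculated, and before the correlation
--     is calculated.
--     """
--     merged = unmerged.pop()
--     for um in unmerged:
--         # have to merge at each lag.
--         for (glag_min, glag_max, gxys), (ulag_min, ulag_max, uxys) in \
--                                                 izip(merged, um):
--             assert glag_min == ulag_min and glag_max == ulag_max
--             gxys["x"].extend(uxys["x"])
--             gxys["y"].extend(uxys["y"])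
--             # reduce copies in memory.
--             uxys = {}
--     return merged
-- ===== SOURCE B (Python) =====
-- def merge_acfs(unmerged):
--     """
--     utitlity function to merge the chromosomes after
--     they've been calculated, and before the correlation
--     is calculated.
--     """
--     merged = unmerged.pop()
--     # lag-major rebuild: for each lag entry of the popped chromosome, gather the
--     # matching column from every remaining chromosome and emit a fresh tuple with
--     # a fresh dict built by concatenation; lags no other chromosome reaches are
--     # passed through (the input dicts are never mutated; only the pop mutates unmerged).
--     result = []
--     for i, (lag_min, lag_max, gxys) in enumerate(merged):
--         cols = [um[i] for um in unmerged if i < len(um)]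
--         if not cols:
--             result.append((lag_min, lag_max, gxys))
--             continue
--         assert all(c[0] == lag_min and c[1] == lag_max for c in cols)
--         result.append((lag_min, lag_max,
--                        {**gxys,
--                         "x": gxys["x"] + [v for c in cols for v in c[2]["x"]],
--                         "y": gxys["y"] + [v for c in cols for v in c[2]["y"]]}))
--     return result
-- ===== Notes on version B (the rewrite author's own statement) =====
-- stated objective: alternative
-- what changed: B replaces A's chromosome-major in-place merging (for each remaining chromosome, zip it against merged and extend the dicts) by a lag-major functional rebuild: one pass over the popped chromosome that gathers each lag's column from all other chromosomes and emits a fresh list of fresh dicts via concatenation, never mutating the input dicts.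
import Mathlib
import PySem

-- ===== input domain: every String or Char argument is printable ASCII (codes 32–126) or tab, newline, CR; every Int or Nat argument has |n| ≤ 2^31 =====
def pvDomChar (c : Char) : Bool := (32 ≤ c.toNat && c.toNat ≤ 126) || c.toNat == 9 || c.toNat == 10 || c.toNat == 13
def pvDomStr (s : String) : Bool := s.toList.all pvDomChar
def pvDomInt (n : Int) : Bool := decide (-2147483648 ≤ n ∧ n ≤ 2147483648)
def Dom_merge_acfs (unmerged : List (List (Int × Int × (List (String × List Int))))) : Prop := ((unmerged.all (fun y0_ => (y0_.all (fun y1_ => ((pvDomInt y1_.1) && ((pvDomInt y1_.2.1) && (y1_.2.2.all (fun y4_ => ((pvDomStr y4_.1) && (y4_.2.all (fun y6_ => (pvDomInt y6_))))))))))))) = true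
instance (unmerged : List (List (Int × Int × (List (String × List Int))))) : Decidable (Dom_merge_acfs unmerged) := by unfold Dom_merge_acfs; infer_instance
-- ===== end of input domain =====

-- B rebuilds the result lag-major (fresh list, fresh dicts built by concatenation) instead of
-- A's chromosome-major in-place extends; objective: alternative (same cost). Equivalence is about
-- the RETURN value only: both Pythons pop() from `unmerged`, but A additionally mutates the
-- popped entries' dicts in place while B leaves them untouched.

-- ===== PORT A =====
-- dict read d[k] (first match; a missing key is a Python KeyError, excluded by Pre_, so the read defaults to [])
def pvGetKey (d : List (String × List Int)) (k : String) : List Int :=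
  ((d.find? (fun p => p.1 == k)).map (·.2)).getD []

-- gxys[k].extend(v): append v to the first entry with key k (no-op if absent; Pre_ ensures presence)
def pvExtendKey : List (String × List Int) → String → List Int → List (String × List Int)
  | [], _, _ => []
  | p :: rest, k, v => if p.1 == k then (p.1, p.2 ++ v) :: rest else p :: pvExtendKey rest k v

-- A's loop body for one zipped pair:
-- gxys["x"].extend(uxys["x"]); gxys["y"].extend(uxys["y"])
def pvMergePair (g u : Int × Int × (List (String × List Int))) : Int × Int × (List (String × List Int)) :=
  (g.1, g.2.1, pvExtendKey (pvExtendKey g.2.2 "x" (pvGetKey u.2.2 "x")) "y" (pvGetKey u.2.2 "y"))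

-- one pass of A's inner `for … in izip(merged, um)` loop: entries in the zipped range are
-- updated in place, the tail of `merged` beyond len(um) is untouched
def pvStepA (merged um : List (Int × Int × (List (String × List Int)))) : List (Int × Int × (List (String × List Int))) :=
  (merged.zip um).map (fun p => pvMergePair p.1 p.2) ++ merged.drop um.length

def merge_acfs (unmerged : List (List (Int × Int × (List (String × List Int))))) : List (Int × Int × (List (String × List Int))) :=
  match unmerged.getLast? with
  | none => []  -- Python: unmerged.pop() raises IndexError; excluded by Pre_
  | some merged0 => unmerged.dropLast.foldl pvStepA merged0

-- ===== PORT B =====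
-- dict write d[k] = v ({**gxys, k: v}): overwrite the first entry with key k in place, else append
def pvSetKey : List (String × List Int) → String → List Int → List (String × List Int)
  | [], k, v => [(k, v)]
  | p :: rest, k, v => if p.1 == k then (p.1, v) :: rest else p :: pvSetKey rest k v

-- B's `cols = [um[i] for um in unmerged if i < len(um)]`: the guard + um[i] is pyGet? (i ≥ 0 from enumerate)
def pvCols (rest : List (List (Int × Int × (List (String × List Int))))) (i : Int) : List (Int × Int × (List (String × List Int))) :=
  rest.filterMap (fun um => PySem.List.pyGet? um i)

-- B's fresh tuple: (lag_min, lag_max, {**gxys, "x": gxys["x"] + flattened xs, "y": gxys["y"] + flattened ys})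
def pvRebuildCore (g : Int × Int × (List (String × List Int))) (cols : List (Int × Int × (List (String × List Int)))) : Int × Int × (List (String × List Int)) :=
  let vx := pvGetKey g.2.2 "x" ++ (cols.map (fun c => pvGetKey c.2.2 "x")).flatten
  let vy := pvGetKey g.2.2 "y" ++ (cols.map (fun c => pvGetKey c.2.2 "y")).flatten
  (g.1, g.2.1, pvSetKey (pvSetKey g.2.2 "x" vx) "y" vy)

-- B's `if not cols: pass the lag entry through unchanged`
def pvRebuild (g : Int × Int × (List (String × List Int))) (cols : List (Int × Int × (List (String × List Int)))) : Int × Int × (List (String × List Int)) :=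
  if cols = [] then g else pvRebuildCore g cols

def merge_acfs_alt (unmerged : List (List (Int × Int × (List (String × List Int))))) : List (Int × Int × (List (String × List Int))) :=
  match unmerged.getLast? with
  | none => []  -- Python: unmerged.pop() raises IndexError; excluded by Pre_
  | some merged0 =>
    let rest := unmerged.dropLast
    (PySem.List.enumerate merged0).map (fun ig => pvRebuild ig.2 (pvCols rest ig.1))

-- ===== PRECONDITION & SPEC =====
-- Pre_ excludes exactly the inputs on which Python A raises: the empty list (pop → IndexError),
-- a zipped pair with mismatched lag bounds (AssertionError), and a zipped pair whose merged or
-- incoming dict lacks the "x" or "y" key (KeyError).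
def Pre_merge_acfs (unmerged : List (List (Int × Int × (List (String × List Int))))) : Prop :=
  unmerged ≠ [] ∧
  ∀ um ∈ unmerged.dropLast, ∀ p ∈ (unmerged.getLast?.getD []).zip um,
    p.1.1 = p.2.1 ∧ p.1.2.1 = p.2.2.1 ∧
    "x" ∈ p.1.2.2.map Prod.fst ∧ "y" ∈ p.1.2.2.map Prod.fst ∧
    "x" ∈ p.2.2.2.map Prod.fst ∧ "y" ∈ p.2.2.2.map Prod.fst
instance (unmerged : List (List (Int × Int × (List (String × List Int))))) : Decidable (Pre_merge_acfs unmerged) := by unfold Pre_merge_acfs; infer_instance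

def pvWitness_merge_acfs : (List (List (Int × Int × (List (String × List Int))))) :=
  [[(0, 1, [("x", [1]), ("y", [2])])], [(0, 1, [("x", [3]), ("y", [4])])]]

def Spec_merge_acfs (unmerged : List (List (Int × Int × (List (String × List Int))))) (out : List (Int × Int × (List (String × List Int)))) : Prop := out = merge_acfs_alt unmerged
instance (unmerged : List (List (Int × Int × (List (String × List Int))))) (out : List (Int × Int × (List (String × List Int)))) : Decidable (Spec_merge_acfs unmerged out) := by unfold Spec_merge_acfs; infer_instance

-- ===== CLAIM =====
def Claim_equal_merge_acfs : Prop := ∀ (unmerged : List (List (Int × Int × (List (String × List Int))))), Dom_merge_acfs unmerged → Pre_merge_acfs unmerged → Spec_merge_acfs unmerged (merge_acfs unmerged)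

-- ===== LEMMAS AND PROOFS =====

-- the A-side loop, per lag index: merging um into merged touches index i iff um[i] exists
def pvStepB (i : Int) (g : Int × Int × (List (String × List Int))) (um : List (Int × Int × (List (String × List Int)))) : Int × Int × (List (String × List Int)) :=
  match PySem.List.pyGet? um i with
  | some u => pvMergePair g u
  | none => g

theorem getElem?_pvStepA (m um : List (Int × Int × (List (String × List Int)))) (i : Nat) :
    (pvStepA m um)[i]? = m[i]?.map (fun g => pvStepB (i : Int) g um) := by
  unfold pvStepA pvStepB
  simp only [PySem.List.pyGet?_natCast]
  rcases Nat.lt_or_ge i m.length with hm | hm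
  · have ha : m[i]? = some m[i] := List.getElem?_eq_getElem hm
    rcases Nat.lt_or_ge i um.length with hu | hu
    · have hb : um[i]? = some um[i] := List.getElem?_eq_getElem hu
      rw [List.getElem?_append_left (by simp; omega)]
      simp [List.zip, List.getElem?_zipWith, ha, hb]
    · have hb : um[i]? = none := by simp; omega
      rw [List.getElem?_append_right (by simp; omega)]
      simp only [List.getElem?_drop, List.length_map, List.length_zip, ha, hb]
      have hidx : um.length + (i - min m.length um.length) = i := by omega
      rw [hidx, ha]; rfl
  · have ha : m[i]? = none := by simp; omega
    have h2 : ((m.zip um).map (fun p => pvMergePair p.1 p.2) ++ m.drop um.length)[i]? = none := by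
      simp; omega
    simp [ha, h2]

theorem getElem?_foldl_pvStepA (rest : List (List (Int × Int × (List (String × List Int)))))
    (m : List (Int × Int × (List (String × List Int)))) (i : Nat) :
    (rest.foldl pvStepA m)[i]? = m[i]?.map (fun g => rest.foldl (pvStepB (i : Int)) g) := by
  induction rest generalizing m with
  | nil => simp
  | cons um rest ih =>
    simp only [List.foldl_cons, ih, getElem?_pvStepA, Option.map_map]
    rfl

-- dictionary bookkeeping --------------------------------------------------

theorem pvGetKey_cons_self (pv : List Int) (rest : List (String × List Int)) (k : String) :
    pvGetKey ((k, pv) :: rest) k = pv := by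
  simp [pvGetKey, List.find?]

theorem pvGetKey_cons_ne (pk : String) (pv : List Int) (rest : List (String × List Int))
    (k : String) (h : pk ≠ k) : pvGetKey ((pk, pv) :: rest) k = pvGetKey rest k := by
  simp [pvGetKey, List.find?, show (pk == k) = false by simp [h]]

theorem pvExtendKey_cons_self (pv : List Int) (rest : List (String × List Int)) (k : String)
    (v : List Int) : pvExtendKey ((k, pv) :: rest) k v = (k, pv ++ v) :: rest := by
  simp [pvExtendKey]

theorem pvExtendKey_cons_ne (pk : String) (pv : List Int) (rest : List (String × List Int))
    (k : String) (v : List Int) (h : pk ≠ k) :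
    pvExtendKey ((pk, pv) :: rest) k v = (pk, pv) :: pvExtendKey rest k v := by
  simp [pvExtendKey, show (pk == k) = false by simp [h]]

theorem pvSetKey_cons_self (pv : List Int) (rest : List (String × List Int)) (k : String)
    (v : List Int) : pvSetKey ((k, pv) :: rest) k v = (k, v) :: rest := by
  simp [pvSetKey]

theorem pvSetKey_cons_ne (pk : String) (pv : List Int) (rest : List (String × List Int))
    (k : String) (v : List Int) (h : pk ≠ k) :
    pvSetKey ((pk, pv) :: rest) k v = (pk, pv) :: pvSetKey rest k v := by
  simp [pvSetKey, show (pk == k) = false by simp [h]]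

theorem pvMem_tail (pk : String) (pv : List Int) (rest : List (String × List Int)) (k : String)
    (h : k ∈ ((pk, pv) :: rest).map Prod.fst) (hp : pk ≠ k) : k ∈ rest.map Prod.fst := by
  simp at h; rcases h with h | h
  · exact absurd h.symm hp
  · simpa using h

theorem keys_pvExtendKey (d : List (String × List Int)) (k : String) (v : List Int) :
    (pvExtendKey d k v).map Prod.fst = d.map Prod.fst := by
  induction d with
  | nil => rfl
  | cons p rest ih => unfold pvExtendKey; split_ifs <;> simp [ih]

theorem getKey_pvExtendKey_ne (d : List (String × List Int)) (k k' : String) (v : List Int)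
    (h : k ≠ k') : pvGetKey (pvExtendKey d k' v) k = pvGetKey d k := by
  induction d with
  | nil => rfl
  | cons p rest ih =>
    obtain ⟨pk, pv⟩ := p
    by_cases hp : pk = k'
    · subst hp
      rw [pvExtendKey_cons_self, pvGetKey_cons_ne _ _ _ _ (Ne.symm h),
        pvGetKey_cons_ne _ _ _ _ (Ne.symm h)]
    · rw [pvExtendKey_cons_ne _ _ _ _ _ hp]
      by_cases hk : pk = k
      · subst hk; rw [pvGetKey_cons_self, pvGetKey_cons_self]
      · rw [pvGetKey_cons_ne _ _ _ _ hk, pvGetKey_cons_ne _ _ _ _ hk, ih]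

theorem getKey_pvExtendKey_self (d : List (String × List Int)) (k : String) (v : List Int)
    (h : k ∈ d.map Prod.fst) : pvGetKey (pvExtendKey d k v) k = pvGetKey d k ++ v := by
  induction d with
  | nil => simp at h
  | cons p rest ih =>
    obtain ⟨pk, pv⟩ := p
    by_cases hp : pk = k
    · subst hp; rw [pvExtendKey_cons_self, pvGetKey_cons_self, pvGetKey_cons_self]
    · rw [pvExtendKey_cons_ne _ _ _ _ _ hp, pvGetKey_cons_ne _ _ _ _ hp,
        pvGetKey_cons_ne _ _ _ _ hp, ih (pvMem_tail _ _ _ _ h hp)]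

theorem pvExtendKey_eq_setKey (d : List (String × List Int)) (k : String) (v : List Int)
    (h : k ∈ d.map Prod.fst) : pvExtendKey d k v = pvSetKey d k (pvGetKey d k ++ v) := by
  induction d with
  | nil => simp at h
  | cons p rest ih =>
    obtain ⟨pk, pv⟩ := p
    by_cases hp : pk = k
    · subst hp; rw [pvExtendKey_cons_self, pvGetKey_cons_self, pvSetKey_cons_self]
    · rw [pvExtendKey_cons_ne _ _ _ _ _ hp, pvGetKey_cons_ne _ _ _ _ hp,
        pvSetKey_cons_ne _ _ _ _ _ hp, ih (pvMem_tail _ _ _ _ h hp)]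

theorem pvSetKey_pvSetKey_self (d : List (String × List Int)) (k : String) (v w : List Int) :
    pvSetKey (pvSetKey d k v) k w = pvSetKey d k w := by
  induction d with
  | nil => simp [pvSetKey]
  | cons p rest ih =>
    obtain ⟨pk, pv⟩ := p
    by_cases hp : pk = k
    · subst hp; rw [pvSetKey_cons_self, pvSetKey_cons_self, pvSetKey_cons_self]
    · rw [pvSetKey_cons_ne _ _ _ _ _ hp, pvSetKey_cons_ne _ _ _ _ _ hp,
        pvSetKey_cons_ne _ _ _ _ _ hp, ih]

theorem mem_keys_pvSetKey_self (d : List (String × List Int)) (k : String) (v : List Int) :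
    k ∈ (pvSetKey d k v).map Prod.fst := by
  induction d with
  | nil => simp [pvSetKey]
  | cons p rest ih =>
    obtain ⟨pk, pv⟩ := p
    by_cases hp : pk = k
    · subst hp; rw [pvSetKey_cons_self]; simp
    · rw [pvSetKey_cons_ne _ _ _ _ _ hp]; simpa using Or.inr ih

theorem pvSetKey_comm (d : List (String × List Int)) (k k' : String) (v w : List Int)
    (hne : k ≠ k') (h : k ∈ d.map Prod.fst) :
    pvSetKey (pvSetKey d k' w) k v = pvSetKey (pvSetKey d k v) k' w := by
  induction d with
  | nil => simp at h
  | cons p rest ih =>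
    obtain ⟨pk, pv⟩ := p
    by_cases hp : pk = k
    · subst hp
      rw [pvSetKey_cons_ne _ _ _ _ _ hne, pvSetKey_cons_self, pvSetKey_cons_self,
        pvSetKey_cons_ne _ _ _ _ _ hne]
    · by_cases hp' : pk = k'
      · subst hp'
        rw [pvSetKey_cons_self, pvSetKey_cons_ne _ _ _ _ _ hp,
          pvSetKey_cons_ne _ _ _ _ _ hp, pvSetKey_cons_self]
      · rw [pvSetKey_cons_ne _ _ _ _ _ hp', pvSetKey_cons_ne _ _ _ _ _ hp,
          pvSetKey_cons_ne _ _ _ _ _ hp, pvSetKey_cons_ne _ _ _ _ _ hp',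
          ih (pvMem_tail _ _ _ _ h hp)]

theorem pvSetKey_getKey_self (d : List (String × List Int)) (k : String)
    (h : k ∈ d.map Prod.fst) : pvSetKey d k (pvGetKey d k) = d := by
  induction d with
  | nil => simp at h
  | cons p rest ih =>
    obtain ⟨pk, pv⟩ := p
    by_cases hp : pk = k
    · subst hp; rw [pvGetKey_cons_self, pvSetKey_cons_self]
    · rw [pvGetKey_cons_ne _ _ _ _ hp, pvSetKey_cons_ne _ _ _ _ _ hp,
        ih (pvMem_tail _ _ _ _ h hp)]

-- absorbing one merged chromosome entry into B's one-shot dict rebuild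
theorem pvAbsorb (d : List (String × List Int)) (ux uy fx fy : List Int)
    (hx : "x" ∈ d.map Prod.fst) (hy : "y" ∈ d.map Prod.fst) :
    pvSetKey
      (pvSetKey (pvExtendKey (pvExtendKey d "x" ux) "y" uy) "x"
        (pvGetKey (pvExtendKey (pvExtendKey d "x" ux) "y" uy) "x" ++ fx)) "y"
      (pvGetKey (pvExtendKey (pvExtendKey d "x" ux) "y" uy) "y" ++ fy)
    = pvSetKey (pvSetKey d "x" (pvGetKey d "x" ++ (ux ++ fx))) "y"
        (pvGetKey d "y" ++ (uy ++ fy)) := by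
  have hxney : ("x" : String) ≠ "y" := by decide
  have hyk : "y" ∈ (pvExtendKey d "x" ux).map Prod.fst := by
    rw [keys_pvExtendKey]; exact hy
  have h1 : pvGetKey (pvExtendKey (pvExtendKey d "x" ux) "y" uy) "x"
      = pvGetKey d "x" ++ ux := by
    rw [getKey_pvExtendKey_ne _ _ _ _ hxney, getKey_pvExtendKey_self _ _ _ hx]
  have h2 : pvGetKey (pvExtendKey (pvExtendKey d "x" ux) "y" uy) "y"
      = pvGetKey d "y" ++ uy := by
    rw [getKey_pvExtendKey_self _ _ _ hyk, getKey_pvExtendKey_ne _ _ _ _ hxney.symm]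
  have h3 : pvExtendKey (pvExtendKey d "x" ux) "y" uy
      = pvSetKey (pvSetKey d "x" (pvGetKey d "x" ++ ux)) "y" (pvGetKey d "y" ++ uy) := by
    rw [pvExtendKey_eq_setKey _ _ _ hyk, getKey_pvExtendKey_ne _ _ _ _ hxney.symm,
      pvExtendKey_eq_setKey _ _ _ hx]
  rw [h1, h2, h3]
  rw [pvSetKey_comm _ "x" "y" _ _ hxney (mem_keys_pvSetKey_self _ _ _),
    pvSetKey_pvSetKey_self, pvSetKey_pvSetKey_self]
  simp [List.append_assoc]

-- a nonempty column forces the keys to exist, so the pass-through `if` can be dropped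
theorem pvRebuild_eq_core (g : Int × Int × (List (String × List Int)))
    (cols : List (Int × Int × (List (String × List Int))))
    (hx : "x" ∈ g.2.2.map Prod.fst) (hy : "y" ∈ g.2.2.map Prod.fst) :
    pvRebuild g cols = pvRebuildCore g cols := by
  unfold pvRebuild
  split_ifs with hc
  · subst hc
    obtain ⟨a, b, d⟩ := g
    simp only [pvRebuildCore, List.map_nil, List.flatten_nil, List.append_nil]
    rw [pvSetKey_getKey_self d "x" hx, pvSetKey_getKey_self d "y" hy]
  · rfl

-- the core per-lag-entry equation: fold-merging every other chromosome's entry at this lag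
-- into g equals B's one-shot rebuild from the gathered column
theorem foldl_pvStepB_eq_pvRebuild (rest : List (List (Int × Int × (List (String × List Int)))))
    (i : Int) (g : Int × Int × (List (String × List Int)))
    (H : pvCols rest i ≠ [] → "x" ∈ g.2.2.map Prod.fst ∧ "y" ∈ g.2.2.map Prod.fst) :
    rest.foldl (pvStepB i) g = pvRebuild g (pvCols rest i) := by
  induction rest generalizing g with
  | nil => simp [pvCols, pvRebuild]
  | cons um rest ih =>
    simp only [List.foldl_cons, pvCols, List.filterMap_cons]
    cases hu : PySem.List.pyGet? um i with
    | none =>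
      simp only [pvStepB, hu, pvCols] at ih H ⊢
      exact ih g (fun hne => H (by simp only [List.filterMap_cons, hu]; exact hne))
    | some u =>
      obtain ⟨hx, hy⟩ := H (by simp [pvCols, hu])
      simp only [pvStepB, hu]
      have hx' : "x" ∈ (pvMergePair g u).2.2.map Prod.fst := by
        simp [pvMergePair, keys_pvExtendKey, hx]
      have hy' : "y" ∈ (pvMergePair g u).2.2.map Prod.fst := by
        simp [pvMergePair, keys_pvExtendKey, hy]
      rw [ih (pvMergePair g u) (fun _ => ⟨hx', hy'⟩),
        pvRebuild_eq_core _ _ hx' hy', pvRebuild_eq_core _ _ hx hy]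
      obtain ⟨a, b, d⟩ := g
      simp only [pvMergePair, pvRebuildCore, pvCols, List.map_cons, List.flatten_cons,
        Prod.mk.injEq, true_and]
      exact pvAbsorb d _ _ _ _ hx hy

-- the two ports agree pointwise under Pre_
theorem merge_acfs_eq_alt (unmerged : List (List (Int × Int × (List (String × List Int)))))
    (hpre : Pre_merge_acfs unmerged) :
    merge_acfs unmerged = merge_acfs_alt unmerged := by
  obtain ⟨-, hzip⟩ := hpre
  unfold merge_acfs merge_acfs_alt
  cases h : unmerged.getLast? with
  | none => rfl
  | some merged0 =>
    rw [h] at hzip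
    apply List.ext_getElem?
    intro i
    rw [getElem?_foldl_pvStepA]
    rw [List.getElem?_map, PySem.List.getElem?_enumerate, Option.map_map]
    cases hg : merged0[i]? with
    | none => rfl
    | some g =>
      have H : pvCols unmerged.dropLast (i : Int) ≠ [] →
          "x" ∈ g.2.2.map Prod.fst ∧ "y" ∈ g.2.2.map Prod.fst := by
        intro hc
        simp only [pvCols] at hc
        obtain ⟨um, hum, u, hu⟩ : ∃ um ∈ unmerged.dropLast,
            ∃ u, PySem.List.pyGet? um (i : Int) = some u := by
          rcases h' : unmerged.dropLast.filterMap (fun um => PySem.List.pyGet? um (i : Int)) with _ | ⟨c, cs⟩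
          · exact absurd h' hc
          · have hcm : c ∈ unmerged.dropLast.filterMap (fun um => PySem.List.pyGet? um (i : Int)) := by
              rw [h']; exact List.mem_cons_self
            rcases List.mem_filterMap.mp hcm with ⟨um, hum, hget⟩
            exact ⟨um, hum, c, hget⟩
        rw [PySem.List.pyGet?_natCast] at hu
        have hm : (g, u) ∈ merged0.zip um :=
          List.mem_of_getElem? (l := merged0.zip um) (i := i)
            (by simp [List.zip, List.getElem?_zipWith, hg, hu])
        obtain ⟨-, -, hx, hy, -, -⟩ := hzip um hum (g, u) hm
        exact ⟨hx, hy⟩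
      simp only [Option.map_some, Function.comp]
      rw [foldl_pvStepB_eq_pvRebuild _ _ _ H]
      norm_num

-- ===== VERDICT =====
theorem merge_acfs_spec : Claim_equal_merge_acfs := by
  intro unmerged _ hpre
  unfold Spec_merge_acfs
  exact merge_acfs_eq_alt unmerged hpre
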